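-- pv_equiv track=rewrite | github.com/Andr0id16/Cornichon | cornichon/cornichon.py | findValidIndex
-- ===== SOURCE A (Python) =====
-- def findValidIndex(text:str,pattern:list[str]):
--     '''
--     Given a pattern find last index of meaningless character from pattern
--
--     Args:
--         text: sentence/line to find the valid split index in
--         pattern: list of characters that are valid split characters
--     Returns:
--         index of in text if valid character from pattern was found, else -1
--     Example:
--     >>> findValidIndex("...lotsofcharacters morecharacters...."," +-*,")
--     19
--     >>> findValidIndex("...lotsofcharacters_morecharacters...."," +-*,")
--     -1
--     '''
--
--     inString = [] # stack to store " and ' to find if a string has been opened - like valid parantheses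
--     lastValidIndex = -1
--     for i in range(len(text)):
--         if(text[i] in ["'",'"']):
--             if(inString and inString[-1]==text[i]):
--                 inString.pop()
--             else:
--                 inString.append(text[i])
--         if(text[i] in pattern and not inString):
--             lastValidIndex = i
--     return lastValidIndex
-- ===== SOURCE B (Python) =====
-- def findValidIndex(text: str, pattern: list[str]):
--     # Forward pass: mask of positions that are outside any quoted string
--     # (stack updated before recording, as in the original ordering).
--     outside = []
--     stack = []
--     for ch in text:
--         if ch in ("'", '"'):
--             if stack and stack[-1] == ch:
--                 stack.pop()
--             else:
--                 stack.append(ch)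
--         outside.append(not stack)
--     # Backward scan: first (from the end) index whose char is a valid split char.
--     for i in range(len(text) - 1, -1, -1):
--         if text[i] in pattern and outside[i]:
--             return i
--     return -1
-- ===== Notes on version B (the rewrite author's own statement) =====
-- stated objective: alternative
-- what changed: Splits the single stateful forward loop into a forward pass that precomputes an outside-of-quotes boolean mask and a backward scan that returns the first (i.e. last) valid split index, instead of threading a last-valid-index accumulator through one pass.
import Mathlib
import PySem

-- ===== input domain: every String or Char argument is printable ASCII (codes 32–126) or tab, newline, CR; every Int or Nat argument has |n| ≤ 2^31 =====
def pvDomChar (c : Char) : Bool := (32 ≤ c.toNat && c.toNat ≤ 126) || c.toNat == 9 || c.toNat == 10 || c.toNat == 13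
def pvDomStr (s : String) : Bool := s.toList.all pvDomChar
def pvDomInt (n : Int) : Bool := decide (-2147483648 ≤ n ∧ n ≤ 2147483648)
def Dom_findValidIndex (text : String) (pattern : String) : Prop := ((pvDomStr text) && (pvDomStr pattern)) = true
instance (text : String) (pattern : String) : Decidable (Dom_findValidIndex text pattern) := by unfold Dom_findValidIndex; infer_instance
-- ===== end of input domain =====

-- B separates A's single stateful pass into a precomputed outside-of-quotes mask plus a
-- backward scan for the last valid split index (alternative decomposition, same cost).

-- ===== PORT A =====
-- quote-stack update shared by both ports (the same if/pop/append of both Pythons);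
-- the stack top is modeled as the list head (push = cons, pop = tail)
def pvUpd (st : List Char) (c : Char) : List Char :=
  if c = '\'' || c = '"' then
    match st with
    | t :: rest => if t = c then rest else c :: t :: rest
    | [] => [c]
  else st

-- A's loop over enumerate(text), threading (inString, lastValidIndex)
def pvLoopA (pat : List Char) : List (Int × Char) → List Char → Int → Int
  | [], _, lvi => lvi
  | (i, c) :: rest, st, lvi =>
    let st' := pvUpd st c
    pvLoopA pat rest st' (if pat.contains c && st'.isEmpty then i else lvi)

def findValidIndex (text : String) (pattern : String) : Int :=
  pvLoopA pattern.toList (PySem.List.enumerate text.toList) [] (-1)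

-- ===== PORT B =====
-- forward pass: outside-of-quotes mask, stack updated before each entry is recorded
def pvMask (st : List Char) : List Char → List Bool
  | [] => []
  | c :: rest =>
    let st' := pvUpd st c
    st'.isEmpty :: pvMask st' rest

-- backward scan: first hit from the end (B's range(len-1,-1,-1) loop, as the reversed
-- enumerated zip of text with its mask)
def pvScanBack (pat : List Char) : List (Int × (Char × Bool)) → Int
  | [] => -1
  | (i, (c, b)) :: rest => if pat.contains c && b then i else pvScanBack pat rest

def findValidIndex_alt (text : String) (pattern : String) : Int :=
  let cs := text.toList
  pvScanBack pattern.toList (PySem.List.enumerate (cs.zip (pvMask [] cs))).reverse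

-- ===== PRECONDITION & SPEC =====
def Spec_findValidIndex (text : String) (pattern : String) (out : Int) : Prop := out = findValidIndex_alt text pattern
instance (text : String) (pattern : String) (out : Int) : Decidable (Spec_findValidIndex text pattern out) := by unfold Spec_findValidIndex; infer_instance

-- ===== CLAIM (what is proved, stated in full; the proofs are below) =====
def Claim_equal_findValidIndex : Prop := ∀ (text : String) (pattern : String), Dom_findValidIndex text pattern → Spec_findValidIndex text pattern (findValidIndex text pattern)

-- ===== LEMMAS AND PROOFS =====

-- the enumerated characters paired with their outside-after-update flag, threading the stack
def pvTriples (st : List Char) : List (Int × Char) → List (Int × (Char × Bool))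
  | [] => []
  | (i, c) :: rest =>
    let st' := pvUpd st c
    (i, (c, st'.isEmpty)) :: pvTriples st' rest

theorem pvScanBack_eq_find? (pat : List Char) (l : List (Int × (Char × Bool))) :
    pvScanBack pat l =
      match l.find? (fun p => pat.contains p.2.1 && p.2.2) with
      | some p => p.1
      | none => -1 := by
  induction l with
  | nil => rfl
  | cons p rest ih =>
    obtain ⟨i, c, b⟩ := p
    simp only [pvScanBack, List.find?]
    by_cases h1 : c ∈ pat <;> cases b <;> simp [h1, ih]

theorem pvLoopA_eq_find? (pat : List Char) (l : List (Int × Char)) (st : List Char) (lvi : Int) :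
    pvLoopA pat l st lvi =
      match (pvTriples st l).reverse.find? (fun p => pat.contains p.2.1 && p.2.2) with
      | some p => p.1
      | none => lvi := by
  induction l generalizing st lvi with
  | nil => rfl
  | cons p rest ih =>
    obtain ⟨i, c⟩ := p
    simp only [pvLoopA, pvTriples, List.reverse_cons]
    rw [ih, List.find?_append]
    cases hf : (pvTriples (pvUpd st c) rest).reverse.find?
        (fun p => pat.contains p.2.1 && p.2.2) with
    | some q => simp
    | none =>
      by_cases h : c ∈ pat ∧ pvUpd st c = [] <;> simp [h]

theorem pvTriples_enumerate (st : List Char) (cs : List Char) (s : Int) :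
    PySem.List.enumerate (cs.zip (pvMask st cs)) s = pvTriples st (PySem.List.enumerate cs s) := by
  induction cs generalizing st s with
  | nil => rfl
  | cons c rest ih =>
    simp only [pvMask, List.zip_cons_cons, PySem.List.enumerate_cons, pvTriples]
    exact congrArg _ (ih _ _)

-- ===== VERDICT (by name: the statement is the Claim_ definition above) =====
theorem findValidIndex_spec : Claim_equal_findValidIndex := by
  intro text pattern _
  unfold Spec_findValidIndex findValidIndex findValidIndex_alt
  rw [pvScanBack_eq_find?, pvTriples_enumerate, pvLoopA_eq_find?]
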